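-- pv_equiv track=rewrite | github.com/rtehok/perso-python | leetcode/2090_k-radius-subarray-averages.py | getAveragesV1
-- ===== SOURCE A (Python) =====
-- from typing import List
--
-- def getAveragesV1(nums: List[int], k: int) -> List[int]:
--     res = []
--     n = len(nums)
--     sub = []
--     for i in range(n):
--         if i - k < 0 or i + k >= n:
--             res.append(-1)
--         else:
--             left = i - k
--             right = i + k + 1
--             if not sub:
--                 s = sum(nums[left:right])
--             else:
--                 s -= nums[left - 1]
--                 s += nums[right + 1]
--             res.append(s // (right - left))
--
--     return res
-- ===== SOURCE B (Python) =====
-- from typing import List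
--
-- def getAveragesV1(nums: List[int], k: int) -> List[int]:
--     n = len(nums)
--     w = 2 * k + 1
--     if w > n:
--         return [-1] * n
--     prefix = [0]
--     t = 0
--     for x in nums:
--         t += x
--         prefix.append(t)
--     return ([-1] * k
--             + [(prefix[i + k + 1] - prefix[i - k]) // w for i in range(k, n - k)]
--             + [-1] * k)
-- ===== Notes on version B (the rewrite author's own statement) =====
-- stated objective: faster
-- what changed: B precomputes one prefix-sum array and answers each window in O(1), instead of A's per-index re-summation of the whole 2k+1 window (A's incremental-update branch is dead code since 'sub' is never filled).
-- outside the precondition, e.g. on getAveragesV1([1, 2, 3], -1): A returns [0, 0, 0], B raises IndexError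
import Mathlib
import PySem

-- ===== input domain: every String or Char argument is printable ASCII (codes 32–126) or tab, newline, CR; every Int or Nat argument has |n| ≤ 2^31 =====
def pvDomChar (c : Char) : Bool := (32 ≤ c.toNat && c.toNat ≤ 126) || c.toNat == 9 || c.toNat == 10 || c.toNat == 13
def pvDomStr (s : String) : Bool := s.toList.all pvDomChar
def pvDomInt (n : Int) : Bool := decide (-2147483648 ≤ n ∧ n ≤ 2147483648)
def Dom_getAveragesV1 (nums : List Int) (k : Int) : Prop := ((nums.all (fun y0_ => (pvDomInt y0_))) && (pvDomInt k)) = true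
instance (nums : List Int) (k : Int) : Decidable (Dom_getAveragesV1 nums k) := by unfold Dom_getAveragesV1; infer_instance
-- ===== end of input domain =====

-- B replaces A's per-index re-summation of the 2k+1 window by one prefix-sum pass (O(1) per window).

-- ===== PORT A =====
-- literal transliteration of A: res/s threaded through the loop; `sub` is never appended
-- to in the Python, so it stays [] and the incremental branch is dead (its out-of-range
-- reads are rendered with default 0; Python never reaches them).
def getAveragesV1 (nums : List Int) (k : Int) : List Int :=
  let n : Int := nums.length
  let sub : List Int := []
  (((PySem.List.pyRange 0 n 1).foldl
    (fun (st : List Int × Int) (i : Int) =>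
      if i - k < 0 ∨ i + k ≥ n then (st.1 ++ [-1], st.2)
      else
        let left := i - k
        let right := i + k + 1
        let s : Int :=
          if sub.isEmpty then (PySem.List.slice nums (some left) (some right)).sum
          else st.2 - PySem.List.pyGetD nums (left - 1) 0 + PySem.List.pyGetD nums (right + 1) 0
        (st.1 ++ [PySem.Int.floordiv s (right - left)], s))
    ([], 0))).1

-- ===== PORT B =====
-- literal transliteration of Source B: all -1 when the window exceeds the list; otherwise one
-- prefix-sum pass, then -1 edges concatenated around a comprehension over range(k, n - k).
def getAveragesV1_alt (nums : List Int) (k : Int) : List Int :=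
  let n : Int := nums.length
  let w := 2 * k + 1
  if w > n then List.replicate nums.length (-1)
  else
    let pfx := (nums.foldl (fun (st : List Int × Int) x => (st.1 ++ [st.2 + x], st.2 + x)) ([0], 0)).1
    List.replicate k.toNat (-1)
      ++ (PySem.List.pyRange k (n - k) 1).map (fun i =>
           PySem.Int.floordiv (PySem.List.pyGetD pfx (i + k + 1) 0 - PySem.List.pyGetD pfx (i - k) 0) w)
      ++ List.replicate k.toNat (-1)

-- ===== PRECONDITION & SPEC =====
-- Pre_ restricts to the natural domain of a radius: it excludes k < 0 (outside the task's
-- meaning), where A's empty slice and negative divisor happen to return an all-zeros list.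
def Pre_getAveragesV1 (nums : List Int) (k : Int) : Prop := 0 ≤ k
instance (nums : List Int) (k : Int) : Decidable (Pre_getAveragesV1 nums k) := by unfold Pre_getAveragesV1; infer_instance
def pvWitness_getAveragesV1 : List Int × Int := ([7, 4, 3, 9, 1, 8, 5, 2, 6], 3)

def Spec_getAveragesV1 (nums : List Int) (k : Int) (out : List Int) : Prop := out = getAveragesV1_alt nums k
instance (nums : List Int) (k : Int) (out : List Int) : Decidable (Spec_getAveragesV1 nums k out) := by unfold Spec_getAveragesV1; infer_instance

-- ===== CLAIM (what is proved, stated in full; the proofs are below) =====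
def Claim_equal_getAveragesV1 : Prop := ∀ (nums : List Int) (k : Int), Dom_getAveragesV1 nums k → Pre_getAveragesV1 nums k → Spec_getAveragesV1 nums k (getAveragesV1 nums k)

-- ===== LEMMAS AND PROOFS =====

-- A's loop appends one value per index and (since sub = []) never reads the carried s.
theorem pvA_loop (nums : List Int) (k n : Int) (l : List Int) (res : List Int) (s : Int) :
    ((l.foldl
      (fun (st : List Int × Int) (i : Int) =>
        if i - k < 0 ∨ i + k ≥ n then (st.1 ++ [-1], st.2)
        else
          let s : Int := (PySem.List.slice nums (some (i - k)) (some (i + k + 1))).sum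
          (st.1 ++ [PySem.Int.floordiv s (i + k + 1 - (i - k))], s))
      (res, s))).1
    = res ++ l.map (fun i =>
        if i - k < 0 ∨ i + k ≥ n then -1
        else PySem.Int.floordiv (PySem.List.slice nums (some (i - k)) (some (i + k + 1))).sum (i + k + 1 - (i - k))) := by
  induction l generalizing res s with
  | nil => simp
  | cons i l ih =>
    by_cases h : i - k < 0 ∨ i + k ≥ n
    · simp only [List.foldl_cons, if_pos h, ih, List.map_cons, if_pos h]
      simp
    · simp only [List.foldl_cons, if_neg h, ih, List.map_cons, if_neg h]
      simp

-- B's prefix fold produces the list of prefix sums.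
theorem pvB_prefix (xs : List Int) (acc : List Int) (t : Int) :
    ((xs.foldl (fun (st : List Int × Int) x => (st.1 ++ [st.2 + x], st.2 + x)) (acc, t))).1
    = acc ++ (List.range xs.length).map (fun j => t + (xs.take (j + 1)).sum) := by
  induction xs generalizing acc t with
  | nil => simp
  | cons x xs ih =>
    simp only [List.foldl_cons, ih, List.length_cons, List.range_succ_eq_map,
      List.map_cons, List.map_map, List.take_succ_cons, List.sum_cons,
      List.append_assoc, List.singleton_append]
    congr 1
    congr 1
    · simp
    · apply List.map_congr_left
      intro j hj
      simp only [Function.comp]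
      ring

theorem pvB_prefix_getD (xs : List Int) (j : Nat) (hj : j ≤ xs.length) :
    (((xs.foldl (fun (st : List Int × Int) x => (st.1 ++ [st.2 + x], st.2 + x)) (([0] : List Int), 0))).1).getD j 0
    = (xs.take j).sum := by
  rw [pvB_prefix]
  cases j with
  | zero => simp
  | succ m =>
    have hm : m < xs.length := by omega
    have : ((0 : Int) :: (List.range xs.length).map (fun j => 0 + (xs.take (j + 1)).sum)).getD (m + 1) 0
        = ((List.range xs.length).map (fun j => 0 + (xs.take (j + 1)).sum)).getD m 0 := rfl
    simpa [List.getD, hm] using this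

theorem pv_sum_drop_take (xs : List Int) (a m : Nat) :
    ((xs.drop a).take m).sum = (xs.take (a + m)).sum - (xs.take a).sum := by
  rw [List.take_add]
  simp

theorem pv_edge (nums : List Int) (k a b : Int)
    (h : ∀ i, a ≤ i → i < b → (i - k < 0 ∨ i + k ≥ (nums.length : Int))) :
    (PySem.List.pyRange a b 1).map (fun i =>
        if i - k < 0 ∨ i + k ≥ (nums.length : Int) then -1
        else PySem.Int.floordiv (PySem.List.slice nums (some (i - k)) (some (i + k + 1))).sum
          (i + k + 1 - (i - k)))
      = List.replicate (b - a).toNat (-1) := by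
  rw [List.eq_replicate_iff]
  refine ⟨by simp [PySem.List.length_pyRange_one], ?_⟩
  intro x hx
  obtain ⟨i, hi, rfl⟩ := List.mem_map.mp hx
  rw [PySem.List.mem_pyRange_one] at hi
  rw [if_pos (h i hi.1 hi.2)]

theorem getAveragesV1_spec_aux (nums : List Int) (k : Int) (hk : 0 ≤ k) :
    getAveragesV1 nums k = getAveragesV1_alt nums k := by
  unfold getAveragesV1 getAveragesV1_alt
  simp only [List.isEmpty_nil, if_true]
  rw [pvA_loop, List.nil_append]
  by_cases hw : 2 * k + 1 > (nums.length : Int)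
  · rw [if_pos hw]
    have := pv_edge nums k 0 (nums.length : Int) (by intro i h1 h2; omega)
    rw [show ((nums.length : Int) - 0).toNat = nums.length by omega] at this
    exact this
  · rw [if_neg hw]
    rw [PySem.List.pyRange_one_append 0 k (nums.length : Int) hk (by omega),
        PySem.List.pyRange_one_append k ((nums.length : Int) - k) (nums.length : Int)
          (by omega) (by omega), List.map_append, List.map_append]
    rw [pv_edge nums k 0 k (by intro i h1 h2; omega),
        pv_edge nums k ((nums.length : Int) - k) (nums.length : Int) (by intro i h1 h2; omega)]
    rw [show ((k : Int) - 0).toNat = k.toNat by omega,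
        show ((nums.length : Int) - ((nums.length : Int) - k)).toNat = k.toNat by omega,
        ← List.append_assoc]
    congr 1
    congr 1
    -- middle segment: valid windows, slice sum = prefix-sum difference
    apply List.map_congr_left
    intro i hi
    rw [PySem.List.mem_pyRange_one] at hi
    rw [if_neg (by omega)]
    have hl : (0 : Int) ≤ i - k := by omega
    have hr : (0 : Int) ≤ i + k + 1 := by omega
    rw [PySem.List.slice_toNat _ hl hr]
    set a := (i - k).toNat with ha
    set b := (i + k + 1).toNat with hb
    rw [pv_sum_drop_take nums a (b - a)]
    have hba : a + (b - a) = b := by omega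
    rw [hba]
    rw [PySem.List.pyGetD_of_nonneg _ _ hr, PySem.List.pyGetD_of_nonneg _ _ hl]
    rw [pvB_prefix_getD nums b (by omega), pvB_prefix_getD nums a (by omega)]
    congr 1
    omega

-- ===== VERDICT (by name: the statement is the Claim_ definition above) =====
theorem getAveragesV1_spec : Claim_equal_getAveragesV1 := by
  intro nums k _ hk
  exact getAveragesV1_spec_aux nums k hk
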